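-- pv_equiv track=rewrite | github.com/J-DeWolfe/CrimeDataAnalysis | CrimeDataAnalysis.py | getCrimeTotals
-- ===== SOURCE A (Python) =====
-- def getCrimeTotals(crime_data, gov, violent = True, larceny = True):
--
--     #Returns all crimes (default)
--     #Returns only violent crime if larceny = False
--     #Returns only larceny if violent = False
--     #Returns zeroes if both are False
--     #Nonviolent crimes = all crimes minus violent crimes
--
--     crimes = {}
--     for city in crime_data:
--         if (violent | larceny):
--             if city[gov] in crimes.keys():
--                  crimes[city[gov]] += int(city["Robbery"])
--             else:
--                  crimes[city[gov]] = int(city["Robbery"])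
--             if (violent):
--                 crimes[city[gov]] += int(city["Assault"])
--                 crimes[city[gov]] += int(city["Murder"])
--                 crimes[city[gov]] += int(city["Rape"])
--             if (larceny):
--                 crimes[city[gov]] += int(city["Burglary"])
--                 crimes[city[gov]] += int(city["Theft"])
--                 crimes[city[gov]] += int(city["Vehicle_Theft"])
--         else:
--             crimes[city[gov]] = 0
--     return crimes
-- ===== SOURCE B (Python) =====
-- def getCrimeTotals(crime_data, gov, violent = True, larceny = True):
--     def contrib(city):
--         t = 0
--         if violent or larceny:
--             t += int(city["Robbery"])
--         if violent:
--             t += int(city["Assault"]) + int(city["Murder"]) + int(city["Rape"])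
--         if larceny:
--             t += int(city["Burglary"]) + int(city["Theft"]) + int(city["Vehicle_Theft"])
--         return t
--     keys = []
--     for city in crime_data:
--         if city[gov] not in keys:
--             keys.append(city[gov])
--     return {k: sum(contrib(city) for city in crime_data if city[gov] == k) for k in keys}
-- ===== Notes on version B (the rewrite author's own statement) =====
-- stated objective: alternative
-- what changed: Replaces A's single-pass incremental dict accumulation by a staged group-by: one pass collects the distinct gov keys in first-occurrence order, then for each key a scan over crime_data sums the matching rows' contributions, so no running dict of partial totals is ever maintained.
import Mathlib
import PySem

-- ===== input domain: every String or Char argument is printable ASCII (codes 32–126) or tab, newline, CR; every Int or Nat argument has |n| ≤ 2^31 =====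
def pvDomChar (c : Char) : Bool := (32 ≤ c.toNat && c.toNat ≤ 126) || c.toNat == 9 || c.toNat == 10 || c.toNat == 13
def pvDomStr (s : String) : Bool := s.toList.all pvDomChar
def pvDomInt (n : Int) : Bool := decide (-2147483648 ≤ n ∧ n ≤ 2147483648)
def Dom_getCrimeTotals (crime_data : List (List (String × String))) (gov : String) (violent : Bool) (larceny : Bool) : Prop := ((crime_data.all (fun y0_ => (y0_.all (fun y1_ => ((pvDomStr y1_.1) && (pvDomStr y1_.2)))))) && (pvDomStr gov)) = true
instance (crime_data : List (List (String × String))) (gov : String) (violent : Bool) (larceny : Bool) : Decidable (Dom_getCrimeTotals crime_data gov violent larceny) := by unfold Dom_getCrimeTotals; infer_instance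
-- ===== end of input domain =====

-- B replaces A's single-pass incremental dict accumulation by a staged group-by: a first pass
-- collects the distinct gov keys in first-occurrence order, then a per-key scan sums the matching
-- rows' contributions (objective: alternative; not faster — O(k·n) vs O(n)).

-- ===== PORT A =====
-- city[k] : first-match lookup in the row dict; total form, exact under Pre_ (key present)
def pvCityGet (city : List (String × String)) (k : String) : String :=
  ((PySem.Dict.mk city).get? k).getD ""

-- int(city[k]) : total form, exact under Pre_ (value parses)
def pvCityInt (city : List (String × String)) (k : String) : Int :=
  (((PySem.Dict.mk city).get? k).bind PySem.Int.ofStr?).getD 0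

def getCrimeTotals (crime_data : List (List (String × String))) (gov : String) (violent : Bool) (larceny : Bool) : List (String × Int) :=
  (crime_data.foldl (fun crimes city =>
    if violent || larceny then
      let k := pvCityGet city gov
      -- crimes[k] += x  /  crimes[k] = x  (k is present after the first assignment)
      let c1 := if crimes.contains k then crimes.insert k (crimes.getD k 0 + pvCityInt city "Robbery")
                else crimes.insert k (pvCityInt city "Robbery")
      let c2 := if violent then
          let ca := c1.insert k (c1.getD k 0 + pvCityInt city "Assault")
          let cm := ca.insert k (ca.getD k 0 + pvCityInt city "Murder")
          cm.insert k (cm.getD k 0 + pvCityInt city "Rape")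
        else c1
      let c3 := if larceny then
          let cb := c2.insert k (c2.getD k 0 + pvCityInt city "Burglary")
          let ct := cb.insert k (cb.getD k 0 + pvCityInt city "Theft")
          ct.insert k (ct.getD k 0 + pvCityInt city "Vehicle_Theft")
        else c2
      c3
    else
      (crimes.insert (pvCityGet city gov) 0)) PySem.Dict.empty).items

-- ===== PORT B =====
-- contrib(city): the row's total under the flags (t = 0; three conditional additions)
def pvContrib (city : List (String × String)) (violent larceny : Bool) : Int :=
  let t : Int := 0
  let t := if violent || larceny then t + pvCityInt city "Robbery" else t
  let t := if violent then t + (pvCityInt city "Assault" + pvCityInt city "Murder" + pvCityInt city "Rape") else t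
  let t := if larceny then t + (pvCityInt city "Burglary" + pvCityInt city "Theft" + pvCityInt city "Vehicle_Theft") else t
  t

def getCrimeTotals_alt (crime_data : List (List (String × String))) (gov : String) (violent : Bool) (larceny : Bool) : List (String × Int) :=
  -- pass 1: distinct gov keys in first-occurrence order
  let keys := crime_data.foldl (fun ks city =>
    if pvCityGet city gov ∈ ks then ks else ks ++ [pvCityGet city gov]) []
  -- pass 2: for each key, sum the matching rows' contributions
  keys.map (fun k => (k, crime_data.foldl (fun s city =>
    if pvCityGet city gov == k then s + pvContrib city violent larceny else s) 0))

-- ===== PRECONDITION & SPEC =====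
-- the crime fields A consults under the flags (helper for Pre_ only)
def pvPreFields (violent : Bool) (larceny : Bool) : List String :=
  (if violent || larceny then ["Robbery"] else [])
    ++ (if violent then ["Assault", "Murder", "Rape"] else [])
    ++ (if larceny then ["Burglary", "Theft", "Vehicle_Theft"] else [])

-- Pre_ excludes exactly the inputs where the Python A raises: a row missing the gov key
-- (KeyError) or, when a crime field is consulted, a missing field or a value int() rejects
-- (KeyError/ValueError).
def Pre_getCrimeTotals (crime_data : List (List (String × String))) (gov : String) (violent : Bool) (larceny : Bool) : Prop :=
  ∀ city ∈ crime_data,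
    ((PySem.Dict.mk city).get? gov).isSome = true ∧
    ∀ f ∈ pvPreFields violent larceny, ((((PySem.Dict.mk city).get? f).bind PySem.Int.ofStr?).isSome = true)
instance (crime_data : List (List (String × String))) (gov : String) (violent : Bool) (larceny : Bool) : Decidable (Pre_getCrimeTotals crime_data gov violent larceny) := by unfold Pre_getCrimeTotals; infer_instance

def pvWitness_getCrimeTotals : (List (List (String × String))) × String × Bool × Bool :=
  ([[("State", "MA"), ("Robbery", "1"), ("Assault", "2"), ("Murder", "0"), ("Rape", "0"),
     ("Burglary", "3"), ("Theft", "4"), ("Vehicle_Theft", "5")]], "State", true, true)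

def Spec_getCrimeTotals (crime_data : List (List (String × String))) (gov : String) (violent : Bool) (larceny : Bool) (out : List (String × Int)) : Prop := out = getCrimeTotals_alt crime_data gov violent larceny
instance (crime_data : List (List (String × String))) (gov : String) (violent : Bool) (larceny : Bool) (out : List (String × Int)) : Decidable (Spec_getCrimeTotals crime_data gov violent larceny out) := by unfold Spec_getCrimeTotals; infer_instance

-- ===== CLAIM (what is proved, stated in full; the proofs are below) =====
def Claim_equal_getCrimeTotals : Prop := ∀ (crime_data : List (List (String × String))) (gov : String) (violent : Bool) (larceny : Bool), Dom_getCrimeTotals crime_data gov violent larceny → Pre_getCrimeTotals crime_data gov violent larceny → Spec_getCrimeTotals crime_data gov violent larceny (getCrimeTotals crime_data gov violent larceny)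

-- ===== LEMMAS AND PROOFS =====

-- When at least one flag is set, A's per-row step is the canonical "add contrib" step.
theorem pv_step_eq (city : List (String × String)) (gov : String) (violent larceny : Bool)
    (h : violent || larceny = true) (crimes : PySem.Dict String Int) :
    (if violent || larceny then
      let k := pvCityGet city gov
      let c1 := if crimes.contains k then crimes.insert k (crimes.getD k 0 + pvCityInt city "Robbery")
                else crimes.insert k (pvCityInt city "Robbery")
      let c2 := if violent then
          let ca := c1.insert k (c1.getD k 0 + pvCityInt city "Assault")
          let cm := ca.insert k (ca.getD k 0 + pvCityInt city "Murder")
          cm.insert k (cm.getD k 0 + pvCityInt city "Rape")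
        else c1
      let c3 := if larceny then
          let cb := c2.insert k (c2.getD k 0 + pvCityInt city "Burglary")
          let ct := cb.insert k (cb.getD k 0 + pvCityInt city "Theft")
          ct.insert k (ct.getD k 0 + pvCityInt city "Vehicle_Theft")
        else c2
      c3
    else (crimes.insert (pvCityGet city gov) 0)) =
    crimes.insert (pvCityGet city gov)
      (crimes.getD (pvCityGet city gov) 0 + pvContrib city violent larceny) := by
  have hr : (if crimes.contains (pvCityGet city gov) then
        crimes.insert (pvCityGet city gov) (crimes.getD (pvCityGet city gov) 0 + pvCityInt city "Robbery")
      else crimes.insert (pvCityGet city gov) (pvCityInt city "Robbery")) =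
      crimes.insert (pvCityGet city gov) (crimes.getD (pvCityGet city gov) 0 + pvCityInt city "Robbery") := by
    by_cases hc : crimes.contains (pvCityGet city gov) = true
    · simp [hc]
    · have h0 := PySem.Dict.getD_of_not_contains crimes (k := pvCityGet city gov) 0
          ((Bool.not_eq_true _).mp hc)
      simp [hc, h0]
  cases violent <;> cases larceny <;>
    simp_all [pvContrib, PySem.Dict.insert_insert_self, PySem.Dict.getD_insert_self] <;> ring_nf

-- With both flags off, the canonical step also writes 0 as long as every stored value is 0,
-- which the loop maintains.
theorem pv_foldl_zero (crime_data : List (List (String × String))) (gov : String)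
    (crimes : PySem.Dict String Int) (hz : ∀ k, crimes.getD k 0 = 0) :
    crime_data.foldl (fun crimes city => crimes.insert (pvCityGet city gov) 0) crimes =
    crime_data.foldl (fun crimes city =>
      crimes.insert (pvCityGet city gov)
        (crimes.getD (pvCityGet city gov) 0 + pvContrib city false false)) crimes := by
  induction crime_data generalizing crimes with
  | nil => rfl
  | cons city rest ih =>
    have hstep : crimes.insert (pvCityGet city gov)
        (crimes.getD (pvCityGet city gov) 0 + pvContrib city false false) =
        crimes.insert (pvCityGet city gov) 0 := by
      simp [pvContrib, hz]
    rw [List.foldl_cons, List.foldl_cons, ← hstep]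
    exact ih _ (fun k => by
      rw [PySem.Dict.getD_insert]
      split <;> simp [pvContrib, hz])

-- The value the canonical fold stores at k is the sum of matching contributions.
theorem pv_getD_fold (crime_data : List (List (String × String))) (gov : String)
    (violent larceny : Bool) (d : PySem.Dict String Int) (k : String) :
    (crime_data.foldl (fun crimes city =>
      crimes.insert (pvCityGet city gov)
        (crimes.getD (pvCityGet city gov) 0 + pvContrib city violent larceny)) d).getD k 0 =
    d.getD k 0 + (crime_data.map (fun city =>
      if pvCityGet city gov == k then pvContrib city violent larceny else 0)).sum := by
  induction crime_data generalizing d with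
  | nil => simp
  | cons city rest ih =>
    rw [List.foldl_cons, ih, PySem.Dict.getD_insert]
    by_cases hk : k = pvCityGet city gov
    · subst hk; simp; ring
    · simp [hk]
      exact fun h => absurd h.symm hk

-- B's inner per-key fold is that sum.
theorem pv_inner_sum (crime_data : List (List (String × String))) (gov : String)
    (violent larceny : Bool) (k : String) :
    crime_data.foldl (fun s city =>
      if pvCityGet city gov == k then s + pvContrib city violent larceny else s) 0 =
    (crime_data.map (fun city =>
      if pvCityGet city gov == k then pvContrib city violent larceny else 0)).sum := by
  have hf : (fun (s : Int) (city : List (String × String)) =>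
      if pvCityGet city gov == k then s + pvContrib city violent larceny else s) =
      (fun s city => s + (if pvCityGet city gov == k then pvContrib city violent larceny else 0)) := by
    funext s city; split <;> simp
  rw [hf, PySem.List.foldl_add]
  simp

-- B's first pass is set(map key crime_data) in first-occurrence order.
theorem pv_keys_pass (crime_data : List (List (String × String))) (gov : String) :
    crime_data.foldl (fun ks city =>
      if pvCityGet city gov ∈ ks then ks else ks ++ [pvCityGet city gov]) [] =
    PySem.Set.ofList (crime_data.map (fun city => pvCityGet city gov)) := by
  have hf : (fun (ks : List String) (city : List (String × String)) =>
      if pvCityGet city gov ∈ ks then ks else ks ++ [pvCityGet city gov]) =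
      (fun ks city => PySem.Set.add ks (pvCityGet city gov)) := by
    funext ks city; rw [PySem.Set.add_eq_ite]
  rw [hf, ← PySem.Set.update_map_eq_foldl_add, PySem.Set.update_nil_left]

-- ===== VERDICT (by name: the statement is the Claim_ definition above) =====
theorem getCrimeTotals_spec : Claim_equal_getCrimeTotals := by
  intro crime_data gov violent larceny _ _
  unfold Spec_getCrimeTotals getCrimeTotals getCrimeTotals_alt
  -- reduce A's fold to the canonical fold
  have hA : crime_data.foldl (fun crimes city =>
      if violent || larceny then
        let k := pvCityGet city gov
        let c1 := if crimes.contains k then crimes.insert k (crimes.getD k 0 + pvCityInt city "Robbery")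
                  else crimes.insert k (pvCityInt city "Robbery")
        let c2 := if violent then
            let ca := c1.insert k (c1.getD k 0 + pvCityInt city "Assault")
            let cm := ca.insert k (ca.getD k 0 + pvCityInt city "Murder")
            cm.insert k (cm.getD k 0 + pvCityInt city "Rape")
          else c1
        let c3 := if larceny then
            let cb := c2.insert k (c2.getD k 0 + pvCityInt city "Burglary")
            let ct := cb.insert k (cb.getD k 0 + pvCityInt city "Theft")
            ct.insert k (ct.getD k 0 + pvCityInt city "Vehicle_Theft")
          else c2
        c3
      else (crimes.insert (pvCityGet city gov) 0)) PySem.Dict.empty =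
      crime_data.foldl (fun crimes city =>
        crimes.insert (pvCityGet city gov)
          (crimes.getD (pvCityGet city gov) 0 + pvContrib city violent larceny)) PySem.Dict.empty := by
    by_cases h : violent || larceny = true
    · congr 1
      funext crimes city
      exact pv_step_eq city gov violent larceny h crimes
    · obtain ⟨hv, hl⟩ : violent = false ∧ larceny = false := by
        cases violent <;> cases larceny <;> simp_all
      subst hv hl
      simp only [Bool.or_false, if_false, Bool.false_eq_true]
      exact pv_foldl_zero crime_data gov PySem.Dict.empty (fun k => by simp [PySem.Dict.getD_empty])
  rw [hA]
  -- the canonical dict's items are exactly B's grouped list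
  set D := crime_data.foldl (fun crimes city =>
    crimes.insert (pvCityGet city gov)
      (crimes.getD (pvCityGet city gov) 0 + pvContrib city violent larceny)) PySem.Dict.empty with hD
  have hnd : D.keys.Nodup := by
    rw [hD]
    exact PySem.Dict.nodup_keys_foldl_insert_key crime_data (fun city => pvCityGet city gov) _
      PySem.Dict.empty (by simp)
  have hkeys : D.keys = PySem.Set.ofList (crime_data.map (fun city => pvCityGet city gov)) := by
    rw [hD, PySem.Dict.keys_foldl_insert_key, PySem.Dict.keys_empty, PySem.Set.update_nil_left]
  rw [PySem.Dict.items_eq_map_keys D hnd 0, hkeys, pv_keys_pass]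
  apply List.map_congr_left
  intro k _
  rw [pv_inner_sum, hD, pv_getD_fold]
  simp
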